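-- pv_equiv track=rewrite | github.com/plroit/qasem_parser | qasem_parser/qasem_parsing.py | _group_by_sentences
-- ===== SOURCE A (Python) =====
-- def _group_by_sentences(frames, predicates):
--     # let's group back the frames according to sentences,
--     # s.t. the ith list of frames corresponds to the ith sentence.
--     res = []
--     idx = 0
--     frame_counts = [len(doc_preds) for doc_preds in predicates]
--     for frame_count in frame_counts:
--         end_idx = idx + frame_count
--         doc_frames = frames[idx: end_idx]
--         res.append(doc_frames)
--         idx = end_idx
--     return res
-- ===== SOURCE B (Python) =====
-- def _group_by_sentences(frames, predicates):
--     # Consume the frames through a single shared iterator: zipping each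
--     # predicate group against the iterator takes exactly that many frames
--     # (fewer if exhausted), so no index arithmetic or slicing is needed.
--     it = iter(frames)
--     return [[frame for _, frame in zip(doc_preds, it)] for doc_preds in predicates]
-- ===== Notes on version B (the rewrite author's own statement) =====
-- stated objective: alternative
-- what changed: B keeps no index at all: it threads a single shared iterator over the frames and lets zip(doc_preds, it) consume exactly one frame per predicate, instead of A's running-offset slicing of the frames list.
import Mathlib
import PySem

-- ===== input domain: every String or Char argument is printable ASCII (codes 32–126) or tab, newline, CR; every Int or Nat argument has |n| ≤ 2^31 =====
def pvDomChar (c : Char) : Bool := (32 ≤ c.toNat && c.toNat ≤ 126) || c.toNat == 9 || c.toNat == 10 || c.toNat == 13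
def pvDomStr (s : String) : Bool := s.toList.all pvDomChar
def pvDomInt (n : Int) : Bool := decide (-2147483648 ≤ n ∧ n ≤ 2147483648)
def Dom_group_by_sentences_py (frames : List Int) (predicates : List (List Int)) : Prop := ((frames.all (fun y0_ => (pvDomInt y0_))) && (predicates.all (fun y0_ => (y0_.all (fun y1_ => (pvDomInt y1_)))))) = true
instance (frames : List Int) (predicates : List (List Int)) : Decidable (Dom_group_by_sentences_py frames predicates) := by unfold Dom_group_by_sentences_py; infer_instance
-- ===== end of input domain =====

-- B keeps no index: it threads one shared iterator over the frames, each group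
-- zipping against it to consume its frames (objective: alternative; same cost).

-- ===== PORT A =====
-- literal transliteration of A: running index idx, slice frames[idx:end_idx], append
def group_by_sentences_py (frames : List Int) (predicates : List (List Int)) : List (List Int) :=
  let frame_counts : List Int := predicates.map (fun doc_preds => (doc_preds.length : Int))
  (frame_counts.foldl
    (fun (st : List (List Int) × Int) frame_count =>
      let end_idx := st.2 + frame_count
      let doc_frames := PySem.List.slice frames (some st.2) (some end_idx)
      (st.1 ++ [doc_frames], end_idx))
    ([], 0)).1

-- ===== PORT B =====
-- literal transliteration of B: the iterator is the remaining suffix of frames;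
-- zip(doc_preds, it) yields (doc_preds.zip rest).map snd and advances the iterator
-- past the consumed elements (rest.drop doc_preds.length).
def group_by_sentences_py_alt (frames : List Int) (predicates : List (List Int)) : List (List Int) :=
  (predicates.foldl
    (fun (st : List (List Int) × List Int) doc_preds =>
      (st.1 ++ [(doc_preds.zip st.2).map Prod.snd], st.2.drop doc_preds.length))
    ([], frames)).1

-- ===== PRECONDITION & SPEC =====
def Spec_group_by_sentences_py (frames : List Int) (predicates : List (List Int)) (out : List (List Int)) : Prop := out = group_by_sentences_py_alt frames predicates
instance (frames : List Int) (predicates : List (List Int)) (out : List (List Int)) : Decidable (Spec_group_by_sentences_py frames predicates out) := by unfold Spec_group_by_sentences_py; infer_instance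

-- ===== CLAIM (what is proved, stated in full; the proofs are below) =====
def Claim_equal_group_by_sentences_py : Prop := ∀ (frames : List Int) (predicates : List (List Int)), Dom_group_by_sentences_py frames predicates → Spec_group_by_sentences_py frames predicates (group_by_sentences_py frames predicates)

-- ===== LEMMAS AND PROOFS =====

-- zipping a group against the remaining frames takes exactly min(|group|, |rest|) frames
theorem pv_zip_snd {α β : Type} (xs : List α) (ys : List β) :
    (xs.zip ys).map Prod.snd = ys.take xs.length := by
  induction xs generalizing ys with
  | nil => simp
  | cons x xs ih => cases ys with
    | nil => simp
    | cons y ys => simp [ih]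

-- core invariant: A's fold at offset n equals B's fold on the suffix frames.drop n
theorem pv_fold_eq (frames : List Int) (ps : List (List Int)) (res : List (List Int)) (n : Nat) :
    ((ps.map (fun doc_preds => (doc_preds.length : Int))).foldl
      (fun (st : List (List Int) × Int) frame_count =>
        (st.1 ++ [PySem.List.slice frames (some st.2) (some (st.2 + frame_count))], st.2 + frame_count))
      (res, (n : Int))).1
    = (ps.foldl
        (fun (st : List (List Int) × List Int) doc_preds =>
          (st.1 ++ [(doc_preds.zip st.2).map Prod.snd], st.2.drop doc_preds.length))
        (res, frames.drop n)).1 := by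
  induction ps generalizing res n with
  | nil => rfl
  | cons p ps ih =>
    simp only [List.map_cons, List.foldl_cons]
    have hslice : PySem.List.slice frames (some (n : Int)) (some ((n : Int) + (p.length : Int)))
        = (frames.drop n).take p.length := PySem.List.slice_natCast_add frames n p.length
    have hzip : (p.zip (frames.drop n)).map Prod.snd = (frames.drop n).take p.length :=
      pv_zip_snd p (frames.drop n)
    have hcast : (n : Int) + (p.length : Int) = ((n + p.length : Nat) : Int) := by push_cast; ring
    have hdrop : (frames.drop n).drop p.length = frames.drop (n + p.length) := by
      simp [List.drop_drop]
    rw [hslice, hcast]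
    rw [ih (res ++ [(frames.drop n).take p.length]) (n + p.length)]
    all_goals rw [← hdrop]
    all_goals rw [← hzip]

-- ===== VERDICT (by name: the statement is the Claim_ definition above) =====
theorem group_by_sentences_py_spec : Claim_equal_group_by_sentences_py := by
  intro frames predicates _
  unfold Spec_group_by_sentences_py group_by_sentences_py group_by_sentences_py_alt
  simpa using pv_fold_eq frames predicates [] 0
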